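-- pv_equiv track=rewrite | github.com/gcs8/truenas-jbod-ui | app/services/storage_view_templates.py | build_sequential_layout
-- ===== SOURCE A (Python) =====
-- def build_sequential_layout(rows: int, columns: int, slot_count: int) -> list[list[int | None]]:
--     layout: list[list[int | None]] = []
--     slot_number = 0
--     for _ in range(max(1, rows)):
--         row: list[int | None] = []
--         for _ in range(max(1, columns)):
--             if slot_number < slot_count:
--                 row.append(slot_number)
--                 slot_number += 1
--             else:
--                 row.append(None)
--         layout.append(row)
--     return layout
-- ===== SOURCE B (Python) =====
-- def build_sequential_layout(rows: int, columns: int, slot_count: int) -> list[list[int | None]]: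
--     r = max(1, rows)
--     c = max(1, columns)
--     flat = [i if i < slot_count else None for i in range(r * c)]
--     return [flat[k * c:(k + 1) * c] for k in range(r)]
-- ===== Notes on version B (the rewrite author's own statement) =====
-- stated objective: alternative
-- what changed: Replaced the nested loops threading a running slot_number through mutable row/layout accumulators by a two-phase flat-build-then-reshape: one flat comprehension [i if i < slot_count else None for i in range(r*c)] followed by slicing it into rows of length c.
import Mathlib
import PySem

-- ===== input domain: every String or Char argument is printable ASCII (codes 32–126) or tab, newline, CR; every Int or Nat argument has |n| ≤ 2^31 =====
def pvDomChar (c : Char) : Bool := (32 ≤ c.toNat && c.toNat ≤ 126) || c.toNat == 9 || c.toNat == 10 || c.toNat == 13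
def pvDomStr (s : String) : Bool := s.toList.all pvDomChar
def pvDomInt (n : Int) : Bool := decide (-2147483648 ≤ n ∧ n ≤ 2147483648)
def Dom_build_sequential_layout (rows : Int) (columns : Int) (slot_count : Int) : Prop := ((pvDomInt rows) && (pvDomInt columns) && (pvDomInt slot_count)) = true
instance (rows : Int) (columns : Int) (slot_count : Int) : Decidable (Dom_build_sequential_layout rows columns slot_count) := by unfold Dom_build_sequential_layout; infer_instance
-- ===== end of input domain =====

-- B replaces A's nested loops threading a running slot counter by a two-phase flat-build-then-reshape
-- (one flat sequence indexed arithmetically, then sliced into rows); same cost, different decomposition.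

-- ===== PORT A =====
def build_sequential_layout (rows : Int) (columns : Int) (slot_count : Int) : List (List (Option Int)) :=
  ((PySem.List.pyRange 0 (max 1 rows) 1).foldl
    (fun (st : List (List (Option Int)) × Int) _ =>
      let inner := (PySem.List.pyRange 0 (max 1 columns) 1).foldl
        (fun (st2 : List (Option Int) × Int) _ =>
          if st2.2 < slot_count then (st2.1 ++ [some st2.2], st2.2 + 1)
          else (st2.1 ++ [none], st2.2))
        ([], st.2)
      (st.1 ++ [inner.1], inner.2))
    ([], 0)).1

-- ===== PORT B =====
def build_sequential_layout_alt (rows : Int) (columns : Int) (slot_count : Int) : List (List (Option Int)) :=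
  let r := max 1 rows
  let c := max 1 columns
  let flat := (PySem.List.pyRange 0 (r * c) 1).map
    (fun i => if i < slot_count then some i else none)
  (PySem.List.pyRange 0 r 1).map
    (fun k => PySem.List.slice flat (some (k * c)) (some ((k + 1) * c)))

-- ===== PRECONDITION & SPEC =====
def Spec_build_sequential_layout (rows : Int) (columns : Int) (slot_count : Int) (out : List (List (Option Int))) : Prop := out = build_sequential_layout_alt rows columns slot_count
instance (rows : Int) (columns : Int) (slot_count : Int) (out : List (List (Option Int))) : Decidable (Spec_build_sequential_layout rows columns slot_count out) := by unfold Spec_build_sequential_layout; infer_instance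

-- ===== CLAIM (what is proved, stated in full; the proofs are below) =====
def Claim_equal_build_sequential_layout : Prop := ∀ (rows : Int) (columns : Int) (slot_count : Int), Dom_build_sequential_layout rows columns slot_count → Spec_build_sequential_layout rows columns slot_count (build_sequential_layout rows columns slot_count)

-- ===== LEMMAS AND PROOFS =====

theorem pv_inner (sc : Int) (l : List Int) (row : List (Option Int)) (s : Int) :
    l.foldl
      (fun (st2 : List (Option Int) × Int) _ =>
        if st2.2 < sc then (st2.1 ++ [some st2.2], st2.2 + 1)
        else (st2.1 ++ [none], st2.2))
      (row, s)
    = (row ++ (List.range l.length).map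
          (fun j : Nat => if s + (j : Int) < sc then some (s + (j : Int)) else none),
       max s (min (s + (l.length : Int)) sc)) := by
  induction l generalizing row s with
  | nil => simp
  | cons a t ih =>
    simp only [List.foldl_cons, List.length_cons]
    rw [List.range_succ_eq_map, List.map_cons, List.map_map]
    by_cases h : s < sc
    · rw [if_pos h, ih]
      refine Prod.ext ?_ ?_
      · show row ++ [some s] ++ _ = row ++ (if s + ((0:Nat):Int) < sc then some (s + ((0:Nat):Int)) else none) :: _
        rw [if_pos (by push_cast; omega)]
        simp only [Nat.cast_zero, add_zero, List.append_assoc, List.singleton_append]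
        congr 1
        congr 1
        apply List.map_congr_left
        intro j _
        show (if s + 1 + (j:Int) < sc then some (s + 1 + (j:Int)) else none) = _
        have e : s + 1 + (j:Int) = s + ((j:Int) + 1) := by ring
        simp only [Function.comp_apply, Nat.cast_succ, e]
      · show max (s+1) (min (s + 1 + (t.length:Int)) sc) = max s (min (s + ((t.length:Int)+1)) sc)
        omega
    · rw [if_neg h, ih]
      refine Prod.ext ?_ ?_
      · show row ++ [none] ++ _ = row ++ (if s + ((0:Nat):Int) < sc then some (s + ((0:Nat):Int)) else none) :: _
        rw [if_neg (by push_cast; omega)]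
        simp only [List.append_assoc, List.singleton_append]
        congr 1
        congr 1
        apply List.map_congr_left
        intro j _
        show (if s + (j:Int) < sc then some (s + (j:Int)) else none) = _
        simp only [Function.comp_apply, Nat.cast_succ]
        rw [if_neg (by omega), if_neg (by omega)]
      · show max s (min (s + (t.length:Int)) sc) = max s (min (s + ((t.length:Int)+1)) sc)
        omega

def pvRowC (c sc : Int) (k : Nat) : List (Option Int) :=
  (List.range c.toNat).map
    (fun j : Nat => if (k : Int) * c + (j : Int) < sc then some ((k : Int) * c + (j : Int)) else none)

def pvS (c sc : Int) (m : Nat) : Int := max 0 (min ((m : Int) * c) sc)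

theorem pv_row_eq (c sc : Int) (hc : 1 ≤ c) (m : Nat) :
    (List.range c.toNat).map
        (fun j : Nat => if pvS c sc m + (j : Int) < sc then some (pvS c sc m + (j : Int)) else none)
    = pvRowC c sc m := by
  unfold pvRowC pvS
  apply List.map_congr_left
  intro j _
  have ht : 0 ≤ (m : Int) * c := by positivity
  generalize (m : Int) * c = t at *
  split_ifs <;> first | rfl | omega | (congr 1; omega)

theorem pv_S_succ (c sc : Int) (hc : 1 ≤ c) (m : Nat) :
    max (pvS c sc m) (min (pvS c sc m + ((c.toNat : Int))) sc) = pvS c sc (m + 1) := by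
  unfold pvS
  have hcc : ((c.toNat : Int)) = c := by omega
  have ht : 0 ≤ (m : Int) * c := by positivity
  have h2 : ((m + 1 : Nat) : Int) * c = (m : Int) * c + c := by push_cast; ring
  rw [hcc, h2]
  generalize (m : Int) * c = t at *
  omega

theorem pv_outer (c sc : Int) (hc : 1 ≤ c) (l : List Int) (m : Nat)
    (acc : List (List (Option Int))) :
    l.foldl
      (fun (st : List (List (Option Int)) × Int) _ =>
        let inner := (PySem.List.pyRange 0 c 1).foldl
          (fun (st2 : List (Option Int) × Int) _ =>
            if st2.2 < sc then (st2.1 ++ [some st2.2], st2.2 + 1)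
            else (st2.1 ++ [none], st2.2))
          ([], st.2)
        (st.1 ++ [inner.1], inner.2))
      (acc, pvS c sc m)
    = (acc ++ (List.range l.length).map (fun k => pvRowC c sc (m + k)),
       pvS c sc (m + l.length)) := by
  induction l generalizing m acc with
  | nil => simp
  | cons a t ih =>
    simp only [List.foldl_cons, List.length_cons]
    rw [pv_inner sc]
    have hlen : ((PySem.List.pyRange 0 c 1).length : Int) = c := by
      rw [PySem.List.length_pyRange_one]; omega
    have hlenN : (PySem.List.pyRange 0 c 1).length = c.toNat := by omega
    rw [hlenN]
    have hC : ((c.toNat : Int)) = c := by omega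
    rw [List.nil_append, hC]
    rw [show max (pvS c sc m) (min (pvS c sc m + c) sc)
          = pvS c sc (m + 1) from by rw [← pv_S_succ c sc hc m, hC]]
    rw [ih (m + 1)]
    refine Prod.ext ?_ ?_
    · show (acc ++ [_]) ++ _ = acc ++ _
      rw [List.range_succ_eq_map, List.map_cons, List.map_map, List.append_assoc,
        List.singleton_append]
      congr 1
      congr 1
      · show (List.range c.toNat).map _ = pvRowC c sc (m + 0)
        rw [Nat.add_zero]
        exact pv_row_eq c sc hc m
      · apply List.map_congr_left
        intro k _
        show pvRowC c sc (m + 1 + k) = pvRowC c sc (m + (k + 1))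
        congr 1
        omega
    · show pvS c sc (m + 1 + t.length) = pvS c sc (m + (t.length + 1))
      congr 1
      omega

theorem pv_alt_row (c sc r : Int) (hc : 1 ≤ c) (hr : 1 ≤ r) (k : Nat) (hk : k < r.toNat) :
    PySem.List.slice
      ((PySem.List.pyRange 0 (r * c) 1).map (fun i => if i < sc then some i else none))
      (some ((k : Int) * c)) (some (((k : Int) + 1) * c))
    = pvRowC c sc k := by
  have hc0 : (0:Int) ≤ c := by omega
  have hr0 : (0:Int) ≤ r := by omega
  have hC : ((c.toNat : Int)) = c := Int.toNat_of_nonneg hc0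
  have hN : (r * c).toNat = r.toNat * c.toNat := Int.toNat_mul hr0 hc0
  have hb1 : (k : Int) * c = ((k * c.toNat : Nat) : Int) := by push_cast [hC]; ring
  have hb2 : ((k : Int) + 1) * c = ((k * c.toNat : Nat) : Int) + ((c.toNat : Nat) : Int) := by
    push_cast [hC]; ring
  rw [hb1, hb2, PySem.List.slice_natCast_add]
  rw [PySem.List.pyRange_one]
  have hle : k * c.toNat + c.toNat ≤ ((r * c - 0).toNat) := by
    simp only [sub_zero, hN]
    calc k * c.toNat + c.toNat = (k + 1) * c.toNat := by ring
    _ ≤ r.toNat * c.toNat := Nat.mul_le_mul_right _ (by omega)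
  apply List.ext_getElem
  · simp [pvRowC]
    omega
  · intro i h1 h2
    have hi : i < c.toNat := by simpa [pvRowC] using h2
    have hidx : k * c.toNat + i < (r * c - 0).toNat := by omega
    simp only [List.getElem_take, List.getElem_drop, List.getElem_map, List.getElem_range, pvRowC]
    have e : (0:Int) + ((k * c.toNat + i : Nat) : Int) = (k : Int) * c + (i : Int) := by
      push_cast [hC]; ring
    rw [e]

theorem pv_main (rows columns slot_count : Int) :
    ((PySem.List.pyRange 0 (max 1 rows) 1).foldl
      (fun (st : List (List (Option Int)) × Int) _ =>
        let inner := (PySem.List.pyRange 0 (max 1 columns) 1).foldl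
          (fun (st2 : List (Option Int) × Int) _ =>
            if st2.2 < slot_count then (st2.1 ++ [some st2.2], st2.2 + 1)
            else (st2.1 ++ [none], st2.2))
          ([], st.2)
        (st.1 ++ [inner.1], inner.2))
      ([], 0)).1
    = (PySem.List.pyRange 0 (max 1 rows) 1).map
        (fun k => PySem.List.slice
          ((PySem.List.pyRange 0 ((max 1 rows) * (max 1 columns)) 1).map
            (fun i => if i < slot_count then some i else none))
          (some (k * (max 1 columns))) (some ((k + 1) * (max 1 columns)))) := by
  set r := max 1 rows with hrdef
  set c := max 1 columns with hcdef
  have hr : 1 ≤ r := le_max_left _ _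
  have hc : 1 ≤ c := le_max_left _ _
  have h0 : pvS c slot_count 0 = 0 := by unfold pvS; simp
  have hout := pv_outer c slot_count hc (PySem.List.pyRange 0 r 1) 0 []
  rw [h0] at hout
  rw [hout]
  simp only [List.nil_append, Nat.zero_add]
  have hlen : (PySem.List.pyRange 0 r 1).length = r.toNat := by
    rw [PySem.List.length_pyRange_one]; omega
  rw [hlen]
  rw [show PySem.List.pyRange 0 r 1 = (List.range r.toNat).map (fun k : Nat => (k : Int)) from by
    rw [PySem.List.pyRange_one, show r - 0 = r from by ring]
    apply List.map_congr_left; intro k _; ring]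
  rw [List.map_map]
  apply List.map_congr_left
  intro k hk
  have hk' : k < r.toNat := List.mem_range.mp hk
  show pvRowC c slot_count k = _
  rw [← pv_alt_row c slot_count r hc hr k hk']
  simp only [Function.comp_apply]

-- ===== VERDICT (by name: the statement is the Claim_ definition above) =====
theorem build_sequential_layout_spec : Claim_equal_build_sequential_layout := by
  intro rows columns slot_count _
  unfold Spec_build_sequential_layout build_sequential_layout build_sequential_layout_alt
  exact pv_main rows columns slot_count
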